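-- pv_equiv track=rewrite | github.com/oliynykmax/LUT_1 | C6/usernames.py | extract_usernames
-- ===== SOURCE A (Python) =====
-- def extract_usernames(emails):
--     usernames = []
--     for item in emails:
--         clean = item.strip().split("@")[0].lower()
--         if clean not in usernames:
--             usernames.append(clean)
--     usernames.sort()
--     return usernames
-- ===== SOURCE B (Python) =====
-- def extract_usernames(emails):
--     # Different decomposition: clean all (with duplicates), sort once,
--     # then a single adjacent-dedup scan with a 'prev' tracker.
--     cleaned = sorted(item.strip().split("@")[0].lower() for item in emails)
--     result = []
--     prev = None
--     for u in cleaned: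
--         if prev != u:
--             result.append(u)
--             prev = u
--     return result
-- ===== Notes on version B (the rewrite author's own statement) =====
-- stated objective: faster
-- what changed: A dedups eagerly with an O(n) membership scan of the growing result list and sorts last; B cleans everything, sorts the full multiset first, and removes duplicates in one adjacent-equality pass with a 'prev' tracker, so the per-item membership scan disappears.
import Mathlib
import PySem

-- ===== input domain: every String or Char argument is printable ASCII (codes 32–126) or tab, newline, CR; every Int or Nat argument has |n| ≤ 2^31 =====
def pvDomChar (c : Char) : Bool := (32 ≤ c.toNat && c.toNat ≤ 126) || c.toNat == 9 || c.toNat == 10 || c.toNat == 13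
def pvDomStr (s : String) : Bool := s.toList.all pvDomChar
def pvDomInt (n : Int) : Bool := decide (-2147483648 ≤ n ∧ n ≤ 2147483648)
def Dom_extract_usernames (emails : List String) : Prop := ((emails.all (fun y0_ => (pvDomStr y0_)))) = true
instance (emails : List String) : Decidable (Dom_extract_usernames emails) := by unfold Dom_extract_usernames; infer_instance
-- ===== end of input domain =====

-- B replaces A's quadratic dedup-by-membership-scan-then-sort with clean-all, sort the full multiset first, then one adjacent-dedup pass (measured faster in a timing run).

-- ===== PORT A =====
-- item.strip().split("@")[0].lower(): split? with the nonempty separator "@" always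
-- returns 'some' of a nonempty list, so the getD/headD defaults are unreachable (exact).
def pvClean (item : String) : String :=
  PySem.Str.lower (((PySem.Str.split? (PySem.Str.strip item) "@").getD []).headD "")

def extract_usernames (emails : List String) : List String :=
  let usernames := emails.foldl (fun acc item =>
    let clean := pvClean item
    if clean ∈ acc then acc else acc ++ [clean]) []
  PySem.List.sorted usernames (fun x => x)

-- ===== PORT B =====
def extract_usernames_alt (emails : List String) : List String :=
  let cleaned := PySem.List.sorted (emails.map pvClean) (fun x => x)
  (cleaned.foldl (fun (st : List String × Option String) u =>
    if st.2 ≠ some u then (st.1 ++ [u], some u) else st) ([], none)).1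

-- ===== PRECONDITION & SPEC =====
def Spec_extract_usernames (emails : List String) (out : List String) : Prop := out = extract_usernames_alt emails
instance (emails : List String) (out : List String) : Decidable (Spec_extract_usernames emails out) := by unfold Spec_extract_usernames; infer_instance

-- ===== CLAIM (what is proved, stated in full; the proofs are below) =====
def Claim_equal_extract_usernames : Prop := ∀ (emails : List String), Dom_extract_usernames emails → Spec_extract_usernames emails (extract_usernames emails)

-- ===== LEMMAS AND PROOFS =====

-- the adjacent-dedup computed by B's scan, as a structural recursion (proof-side only)
def pvAdj : Option String → List String → List String
  | _, [] => []
  | p, u :: t => if p ≠ some u then u :: pvAdj (some u) t else pvAdj p t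

theorem pvFoldB_eq (c : List String) (r : List String) (p : Option String) :
    (c.foldl (fun (st : List String × Option String) u =>
      if st.2 ≠ some u then (st.1 ++ [u], some u) else st) (r, p)).1 = r ++ pvAdj p c := by
  induction c generalizing r p with
  | nil => simp [pvAdj]
  | cons u t ih =>
    by_cases h : p = some u
    · simpa [List.foldl_cons, pvAdj, h] using ih r (some u)
    · simpa [List.foldl_cons, pvAdj, h] using ih (r ++ [u]) (some u)

theorem pvMem_adj (c : List String) (p : Option String) (x : String)
    (hs : c.Pairwise (· ≤ ·)) (hlb : ∀ v, p = some v → ∀ y ∈ c, v ≤ y) :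
    x ∈ pvAdj p c ↔ x ∈ c ∧ p ≠ some x := by
  induction c generalizing p with
  | nil => simp [pvAdj]
  | cons u t ih =>
    have hs' : t.Pairwise (· ≤ ·) := hs.of_cons
    have hut : ∀ y ∈ t, u ≤ y := fun y hy => List.rel_of_pairwise_cons hs hy
    have ih' := ih (some u) hs' (fun v hv y hy => by cases hv; exact hut y hy)
    by_cases h : p = some u
    · subst h
      rw [show pvAdj (some u) (u :: t) = pvAdj (some u) t from by simp [pvAdj], ih']
      constructor
      · rintro ⟨hxt, hxu⟩
        exact ⟨List.mem_cons_of_mem _ hxt, hxu⟩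
      · rintro ⟨hxc, hxu⟩
        rcases List.mem_cons.mp hxc with rfl | h1
        · exact absurd rfl hxu
        · exact ⟨h1, hxu⟩
    · rw [show pvAdj p (u :: t) = u :: pvAdj (some u) t from by simp [pvAdj, h],
        List.mem_cons, ih']
      constructor
      · rintro (rfl | ⟨hxt, hxu⟩)
        · exact ⟨List.mem_cons_self, h⟩
        · refine ⟨List.mem_cons_of_mem _ hxt, fun hp => ?_⟩
          have hxu' : x ≤ u := hlb x hp u List.mem_cons_self
          have hux : u ≤ x := hut x hxt
          exact hxu (by rw [le_antisymm hux hxu'])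
      · rintro ⟨hxc, hxp⟩
        rcases List.mem_cons.mp hxc with rfl | h1
        · exact Or.inl rfl
        · by_cases hxu : x = u
          · exact Or.inl hxu
          · exact Or.inr ⟨h1, fun he => hxu (by injection he with he; exact he.symm)⟩

theorem pvPairwise_adj (c : List String) (p : Option String)
    (hs : c.Pairwise (· ≤ ·)) : (pvAdj p c).Pairwise (· < ·) := by
  induction c generalizing p with
  | nil => simp [pvAdj]
  | cons u t ih =>
    have hs' : t.Pairwise (· ≤ ·) := hs.of_cons
    have hut : ∀ y ∈ t, u ≤ y := fun y hy => List.rel_of_pairwise_cons hs hy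
    by_cases h : p = some u
    · rw [show pvAdj p (u :: t) = pvAdj p t from by simp [pvAdj, h]]
      exact ih p hs'
    · rw [show pvAdj p (u :: t) = u :: pvAdj (some u) t from by simp [pvAdj, h]]
      refine List.pairwise_cons.mpr ⟨fun y hy => ?_, ih (some u) hs'⟩
      have hm := (pvMem_adj t (some u) y hs'
        (fun v hv z hz => by cases hv; exact hut z hz)).mp hy
      exact lt_of_le_of_ne (hut y hm.1) (fun he => hm.2 (by rw [he]))

theorem pvMem_dedupA (ys : List String) (acc : List String) (x : String) :
    x ∈ ys.foldl (fun a c => if c ∈ a then a else a ++ [c]) acc ↔ x ∈ acc ∨ x ∈ ys := by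
  induction ys generalizing acc with
  | nil => simp
  | cons y t ih =>
    simp only [List.foldl_cons]
    by_cases h : y ∈ acc
    · rw [if_pos h, ih]
      constructor
      · rintro (h1 | h1)
        · exact Or.inl h1
        · exact Or.inr (List.mem_cons_of_mem _ h1)
      · rintro (h1 | h1)
        · exact Or.inl h1
        · rcases List.mem_cons.mp h1 with rfl | h2
          · exact Or.inl h
          · exact Or.inr h2
    · rw [if_neg h, ih]
      simp only [List.mem_append, List.mem_cons]
      tauto

theorem pvNodup_dedupA (ys : List String) (acc : List String) (h : acc.Nodup) :
    (ys.foldl (fun a c => if c ∈ a then a else a ++ [c]) acc).Nodup := by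
  induction ys generalizing acc with
  | nil => simpa
  | cons y t ih =>
    simp only [List.foldl_cons]
    by_cases hy : y ∈ acc
    · rw [if_pos hy]; exact ih acc h
    · rw [if_neg hy]
      refine ih _ ?_
      rw [List.nodup_append]
      refine ⟨h, List.nodup_singleton y, fun a ha b hb => ?_⟩
      rw [List.mem_singleton.mp hb]
      exact fun he => hy (he ▸ ha)

-- ===== VERDICT (by name: the statement is the Claim_ definition above) =====
theorem extract_usernames_spec : Claim_equal_extract_usernames := by
  intro emails _
  unfold Spec_extract_usernames extract_usernames extract_usernames_alt
  have hfoldA : emails.foldl (fun acc item =>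
      let clean := pvClean item
      if clean ∈ acc then acc else acc ++ [clean]) [] =
      (emails.map pvClean).foldl (fun a c => if c ∈ a then a else a ++ [c]) ([] : List String) := by
    rw [List.foldl_map]
  rw [hfoldA, pvFoldB_eq, List.nil_append]
  set ys := emails.map pvClean with hys
  have hsp : (PySem.List.sorted ys (fun x => x)).Pairwise (· ≤ ·) :=
    PySem.List.sorted_pairwise ys (fun x => x)
  have hadj_lt := pvPairwise_adj (PySem.List.sorted ys (fun x => x)) none hsp
  apply PySem.List.sorted_eq_of_perm_of_pairwise_lt _ _ (fun x => x) _ hadj_lt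
  rw [List.perm_ext_iff_of_nodup (hadj_lt.imp fun h => ne_of_lt h)
    (pvNodup_dedupA ys [] List.nodup_nil)]
  intro a
  rw [pvMem_adj _ none a hsp (by simp), pvMem_dedupA]
  simp [PySem.List.mem_sorted]
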